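-- pv_equiv track=rewrite | github.com/Bereket234/competitive-programming | X_sum/x_sum.py | x_sum
-- ===== SOURCE A (Python) =====
-- def x_sum(grid, m, n):
--
--       dig_sum1= [0 for i in range(n+m-1)]
--       dig_sum2= [0 for i in range(n+m-1)]
--
--       for i in range(m):
--             for j in range(n):
--                   sum_= i + j
--                   diff= j-i
--
--                   dig_sum1[sum_] += grid[i][j]
--                   if diff < 0:
--                         diff= n-1+abs(diff)
--                   dig_sum2[diff] += grid[i][j]
--       res= 0
--       for i in range(m):
--             for j in range(n):
--                   sum_= i + j
--                   diff= j-i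
--
--                   if diff < 0:
--                         diff= n-1+abs(diff)
--
--                   pnt= dig_sum1[sum_] + dig_sum2[diff] - grid[i][j]
--                   res= max(res, pnt)
--       return res
-- ===== SOURCE B (Python) =====
-- def x_sum(grid, m, n):
--     res = 0
--     for i in range(m):
--         for j in range(n):
--             t = 0
--             for a in range(m):
--                 for b in range(n):
--                     if a + b == i + j or b - a == j - i:
--                         t += grid[a][b]
--             res = max(res, t)
--     return res
-- ===== Notes on version B (the rewrite author's own statement) =====
-- stated objective: simpler
-- what changed: Drops the two precomputed diagonal-sum tables (indexed by i+j and a folded j-i) and instead, for each cell, sums directly over all cells lying on either diagonal through it, which also makes the center subtraction disappear.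
import Mathlib
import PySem

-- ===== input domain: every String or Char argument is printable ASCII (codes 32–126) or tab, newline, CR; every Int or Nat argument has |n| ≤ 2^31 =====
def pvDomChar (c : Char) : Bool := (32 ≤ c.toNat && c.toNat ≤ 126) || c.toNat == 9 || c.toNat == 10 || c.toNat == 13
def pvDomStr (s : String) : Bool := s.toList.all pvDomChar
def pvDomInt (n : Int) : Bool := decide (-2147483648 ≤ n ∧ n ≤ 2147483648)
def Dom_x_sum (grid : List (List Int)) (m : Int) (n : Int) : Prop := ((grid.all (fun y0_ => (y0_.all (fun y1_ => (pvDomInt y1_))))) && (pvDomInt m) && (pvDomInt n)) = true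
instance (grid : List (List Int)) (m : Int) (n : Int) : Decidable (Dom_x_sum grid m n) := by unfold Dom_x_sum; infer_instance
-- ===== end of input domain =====

-- B replaces A's two precomputed diagonal-sum tables by a direct per-cell sum over
-- all cells lying on either diagonal through the cell (simpler, not faster).

-- ===== PORT A =====
-- grid[i][j] (i, j ≥ 0 and in range under Pre_x_sum; getD is exact there)
def pvCell (grid : List (List Int)) (i j : Nat) : Int := (grid.getD i []).getD j 0

-- A's folded anti-diagonal index: diff = j - i; if diff < 0 then diff = n - 1 + abs(diff)
def pvDIdx (n : Int) (i j : Nat) : Nat :=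
  if (j : Int) - (i : Int) < 0 then ((n : Int) - 1 + |(j : Int) - (i : Int)|).toNat
  else ((j : Int) - (i : Int)).toNat

-- literal port of A: build dig_sum1 (indexed by i+j) and dig_sum2 (indexed by pvDIdx),
-- then a second pass taking max res (dig_sum1[s] + dig_sum2[d] - grid[i][j]) from res = 0
def x_sum (grid : List (List Int)) (m : Int) (n : Int) : Int :=
  let d0 : List Int := List.replicate (n + m - 1).toNat 0
  let d :=
    (List.range m.toNat).foldl (fun (p : List Int × List Int) (i : Nat) =>
      (List.range n.toNat).foldl (fun (p : List Int × List Int) (j : Nat) =>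
        (p.1.set (i + j) (p.1.getD (i + j) 0 + pvCell grid i j),
         p.2.set (pvDIdx n i j) (p.2.getD (pvDIdx n i j) 0 + pvCell grid i j))) p)
      (d0, d0)
  (List.range m.toNat).foldl (fun (res : Int) (i : Nat) =>
    (List.range n.toNat).foldl (fun (res : Int) (j : Nat) =>
      max res (d.1.getD (i + j) 0 + d.2.getD (pvDIdx n i j) 0 - pvCell grid i j)) res) 0

-- ===== PORT B =====
def x_sum_alt (grid : List (List Int)) (m : Int) (n : Int) : Int :=
  (List.range m.toNat).foldl (fun (res : Int) (i : Nat) =>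
    (List.range n.toNat).foldl (fun (res : Int) (j : Nat) =>
      max res
        ((List.range m.toNat).foldl (fun (t : Int) (a : Nat) =>
          (List.range n.toNat).foldl (fun (t : Int) (b : Nat) =>
            if a + b = i + j ∨ (b : Int) - (a : Int) = (j : Int) - (i : Int)
            then t + pvCell grid a b else t) t) 0)) res) 0

-- ===== PRECONDITION & SPEC =====
-- Pre_ excludes exactly the inputs on which A raises IndexError: when n > 0, the grid
-- must have at least m rows and each of its first m rows at least n entries.
def Pre_x_sum (grid : List (List Int)) (m : Int) (n : Int) : Prop :=
  0 < n → (m.toNat ≤ grid.length ∧ ∀ row ∈ grid.take m.toNat, n.toNat ≤ row.length)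
instance (grid : List (List Int)) (m : Int) (n : Int) : Decidable (Pre_x_sum grid m n) := by unfold Pre_x_sum; infer_instance

def pvWitness_x_sum : List (List Int) × Int × Int := ([[1, 2], [3, 4]], 2, 2)

def Spec_x_sum (grid : List (List Int)) (m : Int) (n : Int) (out : Int) : Prop := out = x_sum_alt grid m n
instance (grid : List (List Int)) (m : Int) (n : Int) (out : Int) : Decidable (Spec_x_sum grid m n out) := by unfold Spec_x_sum; infer_instance

-- ===== CLAIM (what is proved, stated in full; the proofs are below) =====
def Claim_equal_x_sum : Prop := ∀ (grid : List (List Int)) (m : Int) (n : Int), Dom_x_sum grid m n → Pre_x_sum grid m n → Spec_x_sum grid m n (x_sum grid m n)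

-- ===== LEMMAS AND PROOFS =====

-- the list of grid coordinates in A's and B's traversal order
def pvCells (M N : Nat) : List (Nat × Nat) :=
  (List.range M).flatMap (fun i => (List.range N).map (fun j => (i, j)))

lemma nested_foldl_eq_cells {β : Type} (M N : Nat) (f : β → Nat → Nat → β) (b : β) :
    (List.range M).foldl (fun p i => (List.range N).foldl (fun p j => f p i j) p) b
      = (pvCells M N).foldl (fun p c => f p c.1 c.2) b := by
  induction M generalizing b with
  | zero => simp [pvCells]
  | succ M ih =>
      simp only [pvCells, List.range_succ, List.foldl_append, List.flatMap_append,
        List.flatMap_singleton, List.foldl_map] at *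
      simp [ih]

lemma mem_pvCells {M N : Nat} {c : Nat × Nat} :
    c ∈ pvCells M N ↔ c.1 < M ∧ c.2 < N := by
  obtain ⟨i, j⟩ := c
  simp [pvCells]

lemma nodup_pvCells (M N : Nat) : (pvCells M N).Nodup := by
  unfold pvCells
  rw [List.nodup_flatMap]
  constructor
  · intro i _
    exact (List.nodup_range).map (fun a b h => by simpa using congrArg Prod.snd h)
  · refine List.Pairwise.imp ?_ (List.pairwise_lt_range)
    intro i i' hlt c hc hc'
    simp only [List.mem_map] at hc hc'
    obtain ⟨j, _, rfl⟩ := hc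
    obtain ⟨j', _, h⟩ := hc'
    have : i' = i := by simpa using congrArg Prod.fst h
    omega

lemma foldl_if_sum (f : Nat × Nat → Int) (p : Nat × Nat → Prop) [DecidablePred p]
    (l : List (Nat × Nat)) (t0 : Int) :
    l.foldl (fun t c => if p c then t + f c else t) t0
      = t0 + (l.map (fun c => if p c then f c else 0)).sum := by
  induction l generalizing t0 with
  | nil => simp
  | cons c l ih =>
      by_cases h : p c
      · simp [h, ih]; ring
      · simp [h, ih]

lemma sum_map_sub3 (F G H : Nat × Nat → Int) (l : List (Nat × Nat)) :
    (l.map (fun c => F c + G c - H c)).sum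
      = (l.map F).sum + (l.map G).sum - (l.map H).sum := by
  induction l with
  | nil => simp
  | cons c l ih => simp only [List.map_cons, List.sum_cons, ih]; ring

lemma sum_map_single (f : Nat × Nat → Int) (x : Nat × Nat) (l : List (Nat × Nat))
    (hnd : l.Nodup) (hx : x ∈ l) :
    (l.map (fun c => if c = x then f c else 0)).sum = f x := by
  induction l with
  | nil => simp at hx
  | cons y l ih =>
      by_cases h : x = y
      · subst h
        have hz : (l.map (fun c => if c = x then f c else 0)) = l.map (fun _ => (0 : Int)) :=
          List.map_congr_left (fun c' hc' =>
            if_neg (fun (he : c' = x) => (List.nodup_cons.mp hnd).1 (he ▸ hc')))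
        simp [hz]
      · have hx' : x ∈ l := (List.mem_cons.mp hx).resolve_left h
        have hne : y ≠ x := fun he => h he.symm
        simp only [List.map_cons, List.sum_cons, if_neg hne,
          ih (List.nodup_cons.mp hnd).2 hx']
        ring

-- getD after set at an in-range index
lemma getD_set_eq (l : List Int) (k : Nat) (v : Int) (s : Nat) (hk : k < l.length) :
    (l.set k v).getD s 0 = if s = k then v else l.getD s 0 := by
  by_cases h : s = k
  · subst h; simp [List.getD_eq_getElem?_getD, hk]
  · have h' : ¬ k = s := fun hh => h hh.symm
    simp [List.getD_eq_getElem?_getD, h, h']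

-- the table-building fold, characterized
lemma tables_spec (g : List (List Int)) (n : Int) (L : Nat) :
    ∀ (cs : List (Nat × Nat)) (d1 d2 : List Int), d1.length = L → d2.length = L →
    (∀ c ∈ cs, c.1 + c.2 < L ∧ pvDIdx n c.1 c.2 < L) →
    ((cs.foldl (fun (p : List Int × List Int) c =>
        (p.1.set (c.1 + c.2) (p.1.getD (c.1 + c.2) 0 + pvCell g c.1 c.2),
         p.2.set (pvDIdx n c.1 c.2) (p.2.getD (pvDIdx n c.1 c.2) 0 + pvCell g c.1 c.2))) (d1, d2)).1.length = L) ∧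
    ((cs.foldl (fun (p : List Int × List Int) c =>
        (p.1.set (c.1 + c.2) (p.1.getD (c.1 + c.2) 0 + pvCell g c.1 c.2),
         p.2.set (pvDIdx n c.1 c.2) (p.2.getD (pvDIdx n c.1 c.2) 0 + pvCell g c.1 c.2))) (d1, d2)).2.length = L) ∧
    (∀ s : Nat,
      (cs.foldl (fun (p : List Int × List Int) c =>
        (p.1.set (c.1 + c.2) (p.1.getD (c.1 + c.2) 0 + pvCell g c.1 c.2),
         p.2.set (pvDIdx n c.1 c.2) (p.2.getD (pvDIdx n c.1 c.2) 0 + pvCell g c.1 c.2))) (d1, d2)).1.getD s 0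
        = d1.getD s 0 + (cs.map (fun c => if c.1 + c.2 = s then pvCell g c.1 c.2 else 0)).sum) ∧
    (∀ t : Nat,
      (cs.foldl (fun (p : List Int × List Int) c =>
        (p.1.set (c.1 + c.2) (p.1.getD (c.1 + c.2) 0 + pvCell g c.1 c.2),
         p.2.set (pvDIdx n c.1 c.2) (p.2.getD (pvDIdx n c.1 c.2) 0 + pvCell g c.1 c.2))) (d1, d2)).2.getD t 0
        = d2.getD t 0 + (cs.map (fun c => if pvDIdx n c.1 c.2 = t then pvCell g c.1 c.2 else 0)).sum) := by
  intro cs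
  induction cs with
  | nil => intro d1 d2 h1 h2 _; simp [h1, h2]
  | cons c cs ih =>
      intro d1 d2 h1 h2 hc
      have hcb := hc c (List.mem_cons_self ..)
      simp only [List.foldl_cons]
      obtain ⟨j1, j2, j3, j4⟩ :=
        ih (d1.set (c.1 + c.2) (d1.getD (c.1 + c.2) 0 + pvCell g c.1 c.2))
           (d2.set (pvDIdx n c.1 c.2) (d2.getD (pvDIdx n c.1 c.2) 0 + pvCell g c.1 c.2))
           (by simp [h1]) (by simp [h2])
           (fun c' h => hc c' (List.mem_cons_of_mem _ h))
      refine ⟨j1, j2, ?_, ?_⟩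
      · intro s
        rw [j3 s, getD_set_eq _ _ _ _ (by omega : c.1 + c.2 < d1.length)]
        simp only [List.map_cons, List.sum_cons]
        by_cases h : c.1 + c.2 = s
        · have h' : s = c.1 + c.2 := h.symm
          simp only [if_pos h, if_pos h']
          rw [h]
          ring
        · have h' : ¬ s = c.1 + c.2 := fun hh => h hh.symm
          simp only [if_neg h, if_neg h']
          ring
      · intro t
        rw [j4 t, getD_set_eq _ _ _ _ (by omega : pvDIdx n c.1 c.2 < d2.length)]
        simp only [List.map_cons, List.sum_cons]
        by_cases h : pvDIdx n c.1 c.2 = t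
        · have h' : t = pvDIdx n c.1 c.2 := h.symm
          simp only [if_pos h, if_pos h']
          rw [h]
          ring
        · have h' : ¬ t = pvDIdx n c.1 c.2 := fun hh => h hh.symm
          simp only [if_neg h, if_neg h']
          ring

-- pointwise congruence for the max-fold
lemma foldl_max_congr (l : List (Nat × Nat)) (f g : Nat × Nat → Int) (r : Int)
    (h : ∀ c ∈ l, f c = g c) :
    l.foldl (fun r c => max r (f c)) r = l.foldl (fun r c => max r (g c)) r := by
  induction l generalizing r with
  | nil => rfl
  | cons c l ih =>
      simp only [List.foldl_cons, h c (List.mem_cons_self ..)]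
      exact ih _ (fun c' hc' => h c' (List.mem_cons_of_mem _ hc'))

-- pvDIdx separates exactly the (Int) diagonals j - i, inside the grid
lemma pvDIdx_eq_iff (n : Int) (a b i j : Nat) (hb : b < n.toNat) (hj : j < n.toNat) :
    pvDIdx n a b = pvDIdx n i j ↔ (b : Int) - (a : Int) = (j : Int) - (i : Int) := by
  unfold pvDIdx
  simp only [Int.abs_eq_natAbs]
  split_ifs <;> omega

lemma pvDIdx_lt (n m : Int) (i j : Nat) (hi : i < m.toNat) (hj : j < n.toNat) :
    pvDIdx n i j < (n + m - 1).toNat := by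
  unfold pvDIdx
  simp only [Int.abs_eq_natAbs]
  split_ifs <;> omega

lemma x_sum_eval (grid : List (List Int)) (m n : Int) :
    x_sum grid m n
      = (pvCells m.toNat n.toNat).foldl (fun r c =>
          max r (((pvCells m.toNat n.toNat).map (fun c' =>
              if c'.1 + c'.2 = c.1 + c.2 then pvCell grid c'.1 c'.2 else 0)).sum
            + ((pvCells m.toNat n.toNat).map (fun c' =>
              if pvDIdx n c'.1 c'.2 = pvDIdx n c.1 c.2 then pvCell grid c'.1 c'.2 else 0)).sum
            - pvCell grid c.1 c.2)) 0 := by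
  have hL : ∀ c ∈ pvCells m.toNat n.toNat,
      c.1 + c.2 < (n + m - 1).toNat ∧ pvDIdx n c.1 c.2 < (n + m - 1).toNat := by
    intro c hc
    obtain ⟨h1, h2⟩ := mem_pvCells.mp hc
    exact ⟨by omega, pvDIdx_lt n m c.1 c.2 h1 h2⟩
  obtain ⟨-, -, h3, h4⟩ := tables_spec grid n (n + m - 1).toNat (pvCells m.toNat n.toNat)
    (List.replicate (n + m - 1).toNat 0) (List.replicate (n + m - 1).toNat 0)
    (by simp) (by simp) hL
  simp only [x_sum, nested_foldl_eq_cells]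
  apply foldl_max_congr
  intro c _
  rw [h3 (c.1 + c.2), h4 (pvDIdx n c.1 c.2)]
  simp

lemma x_sum_alt_eval (grid : List (List Int)) (m n : Int) :
    x_sum_alt grid m n
      = (pvCells m.toNat n.toNat).foldl (fun r c =>
          max r ((pvCells m.toNat n.toNat).map (fun c' =>
            if c'.1 + c'.2 = c.1 + c.2 ∨ (c'.2 : Int) - (c'.1 : Int) = (c.2 : Int) - (c.1 : Int)
            then pvCell grid c'.1 c'.2 else 0)).sum) 0 := by
  simp only [x_sum_alt, nested_foldl_eq_cells]
  apply foldl_max_congr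
  intro c _
  rw [foldl_if_sum (fun c' => pvCell grid c'.1 c'.2)
    (fun c' => c'.1 + c'.2 = c.1 + c.2 ∨ (c'.2 : Int) - (c'.1 : Int) = (c.2 : Int) - (c.1 : Int))]
  simp

-- ===== VERDICT (by name: the statement is the Claim_ definition above) =====
theorem x_sum_spec : Claim_equal_x_sum := by
  intro grid m n _ _
  unfold Spec_x_sum
  rw [x_sum_eval grid m n, x_sum_alt_eval grid m n]
  apply foldl_max_congr
  intro c hc
  obtain ⟨hc1, hc2⟩ := mem_pvCells.mp hc
  rw [← sum_map_single (fun c' => pvCell grid c'.1 c'.2) c (pvCells m.toNat n.toNat)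
    (nodup_pvCells _ _) hc, ← sum_map_sub3]
  apply congrArg List.sum
  apply List.map_congr_left
  intro c' hc'
  obtain ⟨h1, h2⟩ := mem_pvCells.mp hc'
  simp only [pvDIdx_eq_iff n c'.1 c'.2 c.1 c.2 h2 hc2]
  by_cases hA : c'.1 + c'.2 = c.1 + c.2 <;>
    by_cases hB : (c'.2 : Int) - (c'.1 : Int) = (c.2 : Int) - (c.1 : Int)
  · have hcc : c' = c := by
      obtain ⟨a, b⟩ := c'; obtain ⟨i, j⟩ := c
      simp only [Prod.mk.injEq]
      simp only at hA hB
      omega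
    simp [hcc]
  · have hcc : c' ≠ c := by rintro rfl; exact hB rfl
    simp [hA, hB, hcc]
  · have hcc : c' ≠ c := by rintro rfl; exact hA rfl
    simp [hA, hB, hcc]
  · have hcc : c' ≠ c := by rintro rfl; exact hA rfl
    simp [hA, hB, hcc]
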